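-- pv_equiv track=rewrite | github.com/jwlh00/Compilers | Lab A/ToPostfix.py | remove_dot_before_pipe
-- ===== SOURCE A (Python) =====
-- def remove_dot_before_pipe(s):
--     s = list(s)
--     i = 0
--     while i < len(s) - 1:
--         if s[i] == '.' and s[i+1] == '|':
--             s[i] = ''
--             i += 1
--         i += 1
--     return ''.join(s)
-- ===== SOURCE B (Python) =====
-- def remove_dot_before_pipe(s):
--     parts = s.split('|')
--     processed = [p[:-1] if p.endswith('.') else p for p in parts[:-1]] + [parts[-1]]
--     return '|'.join(processed)
-- ===== Notes on version B (the rewrite author's own statement) =====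
-- stated objective: idiomatic
-- what changed: Replaces the index-mutating per-character scan over a char list with a split-on-pipe / drop-one-trailing-dot / rejoin pipeline over segments.
import Mathlib
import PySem

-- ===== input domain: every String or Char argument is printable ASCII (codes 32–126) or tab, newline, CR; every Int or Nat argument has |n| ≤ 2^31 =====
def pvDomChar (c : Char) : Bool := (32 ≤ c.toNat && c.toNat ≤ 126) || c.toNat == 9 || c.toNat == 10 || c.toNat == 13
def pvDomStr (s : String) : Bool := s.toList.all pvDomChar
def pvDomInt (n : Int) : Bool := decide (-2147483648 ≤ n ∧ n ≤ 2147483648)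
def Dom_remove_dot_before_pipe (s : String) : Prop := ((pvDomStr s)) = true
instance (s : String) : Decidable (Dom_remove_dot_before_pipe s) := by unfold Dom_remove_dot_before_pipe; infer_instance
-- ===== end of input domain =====

-- B replaces A's index-mutating scan over a char list by a split-on-'|' / drop-one-trailing-dot / rejoin pipeline (objective: idiomatic; same O(n) cost).

-- ===== PORT A =====
-- A's while loop: i and the mutable list of one-char strings are the state; s[i] = '' blanks the dot.
-- Indices are always in range (i < len-1), so getD with default "" reads exactly Python's s[i].
def pvLoopA (s : List String) (i : Nat) : List String :=
  if i < s.length - 1 then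
    if s.getD i "" = "." ∧ s.getD (i+1) "" = "|" then
      pvLoopA (s.set i "") (i + 2)          -- s[i] = ''; i += 1; i += 1
    else
      pvLoopA s (i + 1)
  else s
termination_by s.length - i
decreasing_by
  · simp only [List.length_set]; omega
  · omega

def remove_dot_before_pipe (s : String) : String :=
  PySem.Str.join "" (pvLoopA (s.toList.map (fun c => String.ofList [c])) 0)   -- list(s); loop; ''.join(s)

-- ===== PORT B =====
-- p[:-1] if p.endswith('.') else p  (endswith with a single char = last element test; p[:-1] = dropLast)
def pvFixSeg (p : List Char) : List Char :=
  if p.getLast? = some '.' then p.dropLast else p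

def remove_dot_before_pipe_alt (s : String) : String :=
  let parts := s.toList.splitOn '|'       -- s.split('|'): exact for a nonempty separator
  let processed := parts.dropLast.map pvFixSeg ++ [parts.getLastD []]   -- [... for p in parts[:-1]] + [parts[-1]]
  String.ofList (PySem.Chars.join ['|'] processed)                       -- '|'.join(processed)

-- ===== PRECONDITION & SPEC =====
def Spec_remove_dot_before_pipe (s : String) (out : String) : Prop := out = remove_dot_before_pipe_alt s
instance (s : String) (out : String) : Decidable (Spec_remove_dot_before_pipe s out) := by unfold Spec_remove_dot_before_pipe; infer_instance

-- ===== CLAIM (what is proved, stated in full; the proofs are below) =====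
def Claim_equal_remove_dot_before_pipe : Prop := ∀ (s : String), Dom_remove_dot_before_pipe s → Spec_remove_dot_before_pipe s (remove_dot_before_pipe s)

-- ===== LEMMAS AND PROOFS =====

-- functional residue of A's loop from position i on the unprocessed suffix
def pvG : List String → List String
  | x :: y :: r => if x = "." ∧ y = "|" then "" :: y :: pvG r else x :: pvG (y :: r)
  | l => l

-- the common mathematical core: delete each '.' immediately followed by '|'
def pvH : List Char → List Char
  | c1 :: c2 :: r => if c1 = '.' ∧ c2 = '|' then c2 :: pvH r else c1 :: pvH (c2 :: r)
  | l => l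

lemma pvLoopA_inv : ∀ (rest done : List String),
    pvLoopA (done ++ rest) done.length = done ++ pvG rest := by
  intro rest
  induction rest using pvG.induct with
  | case1 x y r htrue ih =>
    intro done
    rw [pvLoopA, pvG]
    have hl : done.length < (done ++ x :: y :: r).length - 1 := by
      simp only [List.length_append, List.length_cons]; omega
    have hx : (done ++ x :: y :: r).getD done.length "" = x := by
      simp [List.getD]
    have hy : (done ++ x :: y :: r).getD (done.length + 1) "" = y := by
      simp [List.getD]
    have hset : (done ++ x :: y :: r).set done.length "" = (done ++ ["", y]) ++ r := by
      rw [List.set_append_right _ _ (le_refl _)]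
      simp
    rw [if_pos hl, hx, hy, if_pos htrue, hset]
    have h2 : done.length + 2 = (done ++ ["", y]).length := by simp
    rw [h2, ih]
    simp [htrue]
  | case2 x y r hfalse ih =>
    intro done
    rw [pvLoopA, pvG]
    have hl : done.length < (done ++ x :: y :: r).length - 1 := by
      simp only [List.length_append, List.length_cons]; omega
    have hx : (done ++ x :: y :: r).getD done.length "" = x := by
      simp [List.getD]
    have hy : (done ++ x :: y :: r).getD (done.length + 1) "" = y := by
      simp [List.getD]
    rw [if_pos hl, hx, hy, if_neg hfalse]
    have h1 : done.length + 1 = (done ++ [x]).length := by simp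
    have happ : done ++ x :: y :: r = (done ++ [x]) ++ (y :: r) := by simp
    rw [happ, h1, ih]
    simp [hfalse]
  | case3 l h1 =>
    intro done
    rw [pvLoopA]
    match l, h1 with
    | [], _ => simp [pvG.eq_def]
    | [x], _ =>
      rw [if_neg (by simp only [List.length_append, List.length_cons, List.length_nil]; omega)]
      simp [pvG.eq_def]
    | x :: y :: r, h1 => exact absurd rfl (h1 x y r)

lemma pvJoin_nil_flatten (xss : List (List Char)) :
    PySem.Chars.join [] xss = xss.flatten := by
  induction xss with
  | nil => simp [PySem.Chars.join, List.intercalate]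
  | cons x xs ih =>
    cases xs with
    | nil => simp [PySem.Chars.join, List.intercalate]
    | cons y ys =>
      simp only [PySem.Chars.join, List.intercalate] at *
      simp [List.intersperse, List.flatten] at *
      simpa using ih

lemma pvMkSingleton_eq (c d : Char) : (String.ofList [c] = String.ofList [d]) ↔ c = d := by
  constructor
  · intro h
    have h2 := congrArg String.toList h
    simpa using h2
  · intro h; rw [h]

lemma pvG_join (l : List Char) :
    PySem.Chars.join [] ((pvG (l.map (fun c => String.ofList [c]))).map String.toList) = pvH l := by
  induction l using pvH.induct with
  | case1 c1 c2 r htrue ih =>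
    obtain ⟨h1, h2⟩ := htrue
    subst h1; subst h2
    rw [List.map_cons, List.map_cons, pvG, if_pos (by constructor <;> rfl)]
    rw [pvH, if_pos ⟨rfl, rfl⟩]
    rw [pvJoin_nil_flatten] at ih ⊢
    simpa using ih
  | case2 c1 c2 r hfalse ih =>
    rw [List.map_cons, List.map_cons, pvG]
    rw [if_neg (by
      intro ⟨h1, h2⟩
      exact hfalse ⟨(pvMkSingleton_eq c1 '.').mp h1, (pvMkSingleton_eq c2 '|').mp h2⟩)]
    rw [pvH, if_neg hfalse]
    rw [pvJoin_nil_flatten] at ih ⊢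
    have hmc : String.ofList [c2] :: List.map (fun c => String.ofList [c]) r
        = List.map (fun c => String.ofList [c]) (c2 :: r) := rfl
    rw [List.map_cons, List.flatten_cons, hmc, ih]
    simp
  | case3 l h1 =>
    match l, h1 with
    | [], _ => simp [pvG.eq_def, pvH.eq_def]
    | [c], _ => simp [pvG.eq_def, pvH.eq_def]
    | c1 :: c2 :: r, h1 => exact absurd rfl (h1 c1 c2 r)

lemma pvSplitOn_no_pipe (l : List Char) (h : '|' ∉ l) : l.splitOn '|' = [l] := by
  induction l with
  | nil => rfl
  | cons c r ih =>
    have hc : c ≠ '|' := fun hc => h (hc ▸ List.mem_cons_self)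
    have hr : '|' ∉ r := fun hr => h (List.mem_cons_of_mem _ hr)
    simp only [List.splitOn, List.splitOnP_cons] at *
    rw [if_neg (by simpa using hc)]
    rw [ih hr]
    rfl

lemma pvH_no_pipe (l : List Char) (h : '|' ∉ l) : pvH l = l := by
  induction l using pvH.induct with
  | case1 c1 c2 r htrue =>
    exact absurd (htrue.2 ▸ List.mem_cons_of_mem _ List.mem_cons_self) h
  | case2 c1 c2 r hfalse ih =>
    rw [pvH, if_neg hfalse, ih (fun hm => h (List.mem_cons_of_mem _ hm))]
  | case3 l h1 =>
    match l, h1 with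
    | [], _ => rfl
    | [c], _ => rfl
    | c1 :: c2 :: r, h1 => exact absurd rfl (h1 c1 c2 r)

lemma pvSplitOn_pipe (p r : List Char) (h : '|' ∉ p) :
    (p ++ '|' :: r).splitOn '|' = p :: r.splitOn '|' := by
  induction p with
  | nil => simp [List.splitOn, List.splitOnP_cons]
  | cons c p' ih =>
    have hc : c ≠ '|' := fun hc => h (hc ▸ List.mem_cons_self)
    have hp : '|' ∉ p' := fun hm => h (List.mem_cons_of_mem _ hm)
    simp only [List.cons_append, List.splitOn, List.splitOnP_cons] at *
    rw [if_neg (by simpa using hc), ih hp]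
    rfl

lemma pvH_pipe_nil (r : List Char) : pvH ('|' :: r) = '|' :: pvH r := by
  cases r with
  | nil => rfl
  | cons c2 r' =>
    rw [pvH, if_neg (by intro ⟨h1, _⟩; exact absurd h1 (by decide))]

lemma pvH_pipe (p r : List Char) (h : '|' ∉ p) :
    pvH (p ++ '|' :: r) = pvFixSeg p ++ '|' :: pvH r := by
  induction p with
  | nil => simpa [pvFixSeg] using pvH_pipe_nil r
  | cons c p' ih =>
    have hc : c ≠ '|' := fun hc => h (hc ▸ List.mem_cons_self)
    have hp : '|' ∉ p' := fun hm => h (List.mem_cons_of_mem _ hm)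
    cases p' with
    | nil =>
      by_cases hdot : c = '.'
      · subst hdot
        rw [List.cons_append, List.nil_append, pvH, if_pos ⟨rfl, rfl⟩]
        simp [pvFixSeg]
      · rw [List.cons_append, List.nil_append, pvH,
          if_neg (by intro ⟨h1, _⟩; exact hdot h1)]
        rw [pvH_pipe_nil]
        simp [pvFixSeg, hdot]
    | cons d p'' =>
      have hd : d ≠ '|' := fun hd => hp (hd ▸ List.mem_cons_self)
      rw [List.cons_append, List.cons_append, pvH,
        if_neg (by intro ⟨_, h2⟩; exact hd h2), ← List.cons_append, ih hp]
      have hfix : pvFixSeg (c :: d :: p'') = c :: pvFixSeg (d :: p'') := by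
        unfold pvFixSeg
        rw [List.getLast?_cons_cons]
        split <;> simp_all
      rw [hfix]
      rfl

-- B's whole pipeline expressed on the char list
def pvBL (l : List Char) : List Char :=
  PySem.Chars.join ['|'] ((l.splitOn '|').dropLast.map pvFixSeg ++ [(l.splitOn '|').getLastD []])

lemma pvGetLastD_cons_ne (x : List Char) {ys : List (List Char)} (h : ys ≠ []) :
    (x :: ys).getLastD [] = ys.getLastD [] := by
  cases ys with
  | nil => exact absurd rfl h
  | cons y ys' => simp [List.getLastD_eq_getLast?, List.getLast?_cons_cons]

lemma pvJoin_pipe_cons (x : List Char) (ys : List (List Char)) (h : ys ≠ []) :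
    PySem.Chars.join ['|'] (x :: ys) = x ++ '|' :: PySem.Chars.join ['|'] ys := by
  cases ys with
  | nil => exact absurd rfl h
  | cons y ys' =>
    simp [PySem.Chars.join, List.intercalate, List.intersperse]

lemma pvBL_eq_pvH : ∀ (l : List Char), pvBL l = pvH l := by
  intro l
  induction hn : l.length using Nat.strong_induction_on generalizing l with
  | _ n ih =>
    by_cases hmem : '|' ∈ l
    · -- split at the first '|'
      set p := l.takeWhile (fun c => c != '|') with hp
      have hnp : '|' ∉ p := by
        intro hm
        have := List.mem_takeWhile_imp (p := fun c => c != '|') (hp ▸ hm)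
        simp at this
      have hdw : l.dropWhile (fun c => c != '|') ≠ [] := by
        intro hnil
        have : l = p := by
          conv_lhs => rw [← List.takeWhile_append_dropWhile (p := fun c => c != '|') (l := l)]
          rw [hnil, List.append_nil, hp]
        exact hnp (this ▸ hmem)
      obtain ⟨d, r, hdr⟩ := List.exists_cons_of_ne_nil hdw
      have hd : d = '|' := by
        have h2 := List.head_dropWhile_not (p := fun c => c != '|') (l := l) (by rw [hdr]; simp)
        simp [hdr] at h2
        simpa using h2
      have hl : l = p ++ '|' :: r := by
        conv_lhs => rw [← List.takeWhile_append_dropWhile (p := fun c => c != '|') (l := l)]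
        rw [hdr, hd, hp]
      have hrlen : r.length < n := by
        rw [← hn, hl]; simp; omega
      rw [hl, pvH_pipe p r hnp]
      unfold pvBL
      rw [pvSplitOn_pipe p r hnp]
      have hsne : r.splitOn '|' ≠ [] := List.splitOnP_ne_nil _ _
      rw [List.dropLast_cons_of_ne_nil hsne, List.map_cons, List.cons_append,
        pvGetLastD_cons_ne _ hsne]
      rw [pvJoin_pipe_cons _ _ (by simp)]
      have := ih r.length hrlen r rfl
      unfold pvBL at this
      rw [this]
    · rw [pvH_no_pipe l hmem]
      unfold pvBL
      rw [pvSplitOn_no_pipe l hmem]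
      simp [PySem.Chars.join, List.intercalate]

-- ===== VERDICT (by name: the statement is the Claim_ definition above) =====
theorem remove_dot_before_pipe_spec : Claim_equal_remove_dot_before_pipe := by
  intro s _
  unfold Spec_remove_dot_before_pipe remove_dot_before_pipe remove_dot_before_pipe_alt
  apply String.toList_inj.mp
  rw [PySem.Str.toList_join]
  have h0 : pvLoopA (s.toList.map (fun c => String.ofList [c])) 0
      = pvG (s.toList.map (fun c => String.ofList [c])) := by
    have := pvLoopA_inv (s.toList.map (fun c => String.ofList [c])) []
    simpa using this
  rw [h0]
  have hjoin : PySem.Chars.join "".toList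
      ((pvG (s.toList.map (fun c => String.ofList [c]))).map String.toList) = pvH s.toList := by
    have := pvG_join s.toList
    simpa using this
  rw [hjoin]
  have := pvBL_eq_pvH s.toList
  unfold pvBL at this
  simp only [String.toList_ofList]
  rw [← this]
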